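-- pv_equiv track=rewrite | github.com/uvsq22400951/Attaque-par-fautes-sur-le-DES | attaque_fautes_DES.py | hexatobinary
-- ===== SOURCE A (Python) =====
-- def hexatobinary(hexa, nbrHexa):
--     tabResult = [0] * (nbrHexa * 4)
--     tmp = hexa
--     compteur = nbrHexa * 4 - 1
--
--     for j in range(nbrHexa):
--         entier = tmp & 0xF
--         for i in range(4):
--             tabResult[compteur] = entier % 2
--             entier = entier // 2
--             compteur -= 1
--         tmp = tmp >> 4
--
--     return tabResult
-- ===== SOURCE B (Python) =====
-- def hexatobinary(hexa, nbrHexa):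
--     total = nbrHexa * 4
--     if total <= 0:
--         return []
--     s = format(hexa % (1 << total), '0{}b'.format(total))
--     return [1 if c == '1' else 0 for c in s]
-- ===== Notes on version B (the rewrite author's own statement) =====
-- stated objective: faster
-- what changed: Replaces the nested nibble-and-bit extraction loops writing into a preallocated array by masking the value once and formatting it as a zero-padded binary string, mapped to 0/1 ints.
import Mathlib
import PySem

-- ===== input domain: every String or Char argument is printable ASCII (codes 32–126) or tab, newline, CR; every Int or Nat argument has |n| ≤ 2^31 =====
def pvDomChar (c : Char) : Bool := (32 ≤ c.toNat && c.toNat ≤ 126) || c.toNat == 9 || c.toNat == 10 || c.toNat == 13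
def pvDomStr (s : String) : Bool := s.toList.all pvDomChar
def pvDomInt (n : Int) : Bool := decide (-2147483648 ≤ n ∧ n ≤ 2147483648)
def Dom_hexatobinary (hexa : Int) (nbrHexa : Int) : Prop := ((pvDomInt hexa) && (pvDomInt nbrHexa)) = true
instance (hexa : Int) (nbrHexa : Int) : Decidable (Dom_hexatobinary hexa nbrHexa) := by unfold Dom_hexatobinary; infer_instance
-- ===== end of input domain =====

-- B replaces A's nested nibble/bit-extraction loops by one mask + binary string formatting (measurably faster on large inputs).


-- ===== PORT A =====
-- [0] * (nbrHexa*4) → List.replicate (… .toNat) 0 (Python's list-repeat with a non-positive count is []).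
-- tabResult[compteur] = v → PySem.List.pySetD: exact here, every executed write has 0 ≤ compteur < len(tabResult).
-- tmp & 0xF → PySem.Int.band; tmp >> 4 → >>> (Python-exact per PySem).
def hexatobinary (hexa : Int) (nbrHexa : Int) : List Int :=
  let tabResult : List Int := List.replicate (nbrHexa * 4).toNat 0
  let st :=
    (PySem.List.pyRange 0 nbrHexa 1).foldl
      (fun (st : List Int × Int × Int) _j =>
        let entier := PySem.Int.band st.2.1 0xF
        let inner :=
          (PySem.List.pyRange 0 4 1).foldl
            (fun (s : List Int × Int × Int) _i =>
              (PySem.List.pySetD s.1 s.2.2 (PySem.Int.mod s.2.1 2),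
               PySem.Int.floordiv s.2.1 2, s.2.2 - 1))
            (st.1, entier, st.2.2)
        (inner.1, st.2.1 >>> (4 : Nat), inner.2.2))
      (tabResult, hexa, nbrHexa * 4 - 1)
  st.1

-- ===== PORT B =====
-- format(v, '0{}b'.format(total)) for v ≥ 0 is PySem.Int.toBinChars v (= format(v,'b'))
-- left-padded with '0' to width total; 1 << total → 1 <<< total.toNat (total > 0 here).
def hexatobinary_alt (hexa : Int) (nbrHexa : Int) : List Int :=
  let total := nbrHexa * 4
  if total ≤ 0 then []
  else
    let v := PySem.Int.mod hexa ((1 : Int) <<< total.toNat)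
    let s := List.replicate (total.toNat - (PySem.Int.toBinChars v).length) '0'
               ++ PySem.Int.toBinChars v
    s.map (fun c => if c = '1' then (1 : Int) else 0)

-- ===== PRECONDITION & SPEC =====
def Spec_hexatobinary (hexa : Int) (nbrHexa : Int) (out : List Int) : Prop := out = hexatobinary_alt hexa nbrHexa
instance (hexa : Int) (nbrHexa : Int) (out : List Int) : Decidable (Spec_hexatobinary hexa nbrHexa out) := by unfold Spec_hexatobinary; infer_instance

-- ===== CLAIM (what is proved, stated in full; the proofs are below) =====
def Claim_equal_hexatobinary : Prop := ∀ (hexa : Int) (nbrHexa : Int), Dom_hexatobinary hexa nbrHexa → Spec_hexatobinary hexa nbrHexa (hexatobinary hexa nbrHexa)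

-- ===== LEMMAS AND PROOFS =====

-- The last `total` bits of `v`, most significant first (Euclidean `/` `%`, exact on 2).
def bitsI : Nat → Int → List Int
  | 0, _ => []
  | k+1, v => bitsI k (v / 2) ++ [v % 2]

-- Nat twin of bitsI.
def bitsN : Nat → Nat → List Int
  | 0, _ => []
  | k+1, n => bitsN k (n / 2) ++ [((n % 2 : Nat) : Int)]

-- Binary digit characters of n, most significant first, no leading zeros ('0' for 0).
def binN (n : Nat) : List Char :=
  if n < 2 then [Nat.digitChar n] else binN (n / 2) ++ [Nat.digitChar (n % 2)]
decreasing_by exact Nat.div_lt_self (by omega) (by omega)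

-- A's outer-loop body, extracted for the iteration lemmas (definitionally A's fold body).
def stepA : (List Int × Int × Int) → (List Int × Int × Int) := fun st =>
  let entier := PySem.Int.band st.2.1 0xF
  let inner :=
    (PySem.List.pyRange 0 4 1).foldl
      (fun (s : List Int × Int × Int) _i =>
        (PySem.List.pySetD s.1 s.2.2 (PySem.Int.mod s.2.1 2),
         PySem.Int.floordiv s.2.1 2, s.2.2 - 1))
      (st.1, entier, st.2.2)
  (inner.1, st.2.1 >>> (4 : Nat), inner.2.2)

theorem foldl_ignore {α β : Type} (G : α → α) :
    ∀ (l : List β) (init : α), l.foldl (fun st _ => G st) init = G^[l.length] init := by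
  intro l
  induction l with
  | nil => intro init; rfl
  | cons x t ih =>
      intro init
      simp [List.foldl, ih, Function.iterate_succ_apply]

theorem hexatobinary_eq_iter (hexa nbrHexa : Int) :
    hexatobinary hexa nbrHexa =
      (stepA^[nbrHexa.toNat]
        (List.replicate (nbrHexa * 4).toNat 0, hexa, nbrHexa * 4 - 1)).1 := by
  show ((PySem.List.pyRange 0 nbrHexa 1).foldl (fun st _j => stepA st) _).1 = _
  rw [foldl_ignore stepA, PySem.List.length_pyRange_one]
  norm_num

theorem nat_and_15 (m : Nat) : m &&& 15 = m % 16 := by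
  simpa using Nat.and_two_pow_sub_one_eq_mod m 4

theorem band_fifteen (a : Int) : PySem.Int.band a 15 = a % 16 := by
  unfold PySem.Int.band
  split_ifs with h1 h2 h2
  · rw [show ((15:Int).toNat) = 15 from rfl, nat_and_15]
    omega
  · omega
  · rw [show ((15:Int).toNat) = 15 from rfl, Nat.and_comm, nat_and_15]
    omega
  · omega

theorem set_replicate_append (k : Nat) :
    ∀ (suffix : List Int) (x : Int),
      (List.replicate (k+1) (0:Int) ++ suffix).set k x = List.replicate k 0 ++ x :: suffix := by
  induction k with
  | zero => intro suffix x; rfl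
  | succ k ih =>
      intro suffix x
      rw [List.replicate_succ (n := k+1), List.cons_append, List.set_cons_succ,
          ih, List.replicate_succ, List.cons_append]

theorem writeRep (k : Nat) (suffix : List Int) (x : Int) :
    PySem.List.pySetD (List.replicate (k+1) (0:Int) ++ suffix) ((k : Nat) : Int) x =
      List.replicate k 0 ++ x :: suffix := by
  rw [PySem.List.pySetD_natCast, set_replicate_append]

theorem half_emod (v : Int) (k : Nat) :
    (v % (2 ^ (k+1) : Int)) / 2 = (v / 2) % (2 ^ k : Int) := by
  have hq : v / (2 ^ (k+1) : Int) = (v / 2) / (2 ^ k : Int) := by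
    rw [Int.ediv_ediv_of_nonneg (by norm_num : (0:Int) ≤ 2)]
    ring_nf
  have h1 : v % (2 ^ (k+1) : Int) = v + 2 * (-(2 ^ k * (v / (2 ^ (k+1) : Int)))) := by
    rw [Int.emod_def]; ring_nf
  rw [h1, Int.add_mul_ediv_left _ _ (by norm_num : (2:Int) ≠ 0), hq, Int.emod_def]
  ring

theorem bitsI_emod : ∀ (k : Nat) (v : Int), bitsI k (v % (2 ^ k : Int)) = bitsI k v := by
  intro k
  induction k with
  | zero => intro v; rfl
  | succ k ih =>
      intro v
      show bitsI k (v % (2 ^ (k+1) : Int) / 2) ++ [v % (2 ^ (k+1) : Int) % 2] =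
        bitsI k (v / 2) ++ [v % 2]
      rw [half_emod, ih, Int.emod_emod_of_dvd _ (by exact ⟨2 ^ k, by ring⟩)]

theorem bitsI_add (k : Nat) : ∀ (j : Nat) (v : Int),
    bitsI (k + j) v = bitsI k (v / (2 ^ j : Int)) ++ bitsI j v := by
  intro j
  induction j with
  | zero => intro v; simp [bitsI]
  | succ j ih =>
      intro v
      show bitsI (k + j + 1) v = _
      rw [show k + j + 1 = (k + j) + 1 from rfl]
      show bitsI (k + j) (v / 2) ++ [v % 2] = _
      rw [ih (v / 2), Int.ediv_ediv_of_nonneg (by norm_num : (0:Int) ≤ 2)]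
      have h2 : (2 : Int) * 2 ^ j = 2 ^ (j + 1) := by ring
      rw [h2]
      simp [bitsI]

theorem bitsI_natCast : ∀ (k : Nat) (n : Nat), bitsI k ((n : Nat) : Int) = bitsN k n := by
  intro k
  induction k with
  | zero => intro n; rfl
  | succ k ih =>
      intro n
      show bitsI k (((n : Nat) : Int) / 2) ++ [((n : Nat) : Int) % 2] = bitsN k (n / 2) ++ _
      rw [show ((n : Nat) : Int) / 2 = ((n / 2 : Nat) : Int) by omega, ih,
          show ((n : Nat) : Int) % 2 = ((n % 2 : Nat) : Int) by omega]

theorem bitsN_zero : ∀ (k : Nat), bitsN k 0 = List.replicate k 0 := by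
  intro k
  induction k with
  | zero => rfl
  | succ k ih =>
      show bitsN k 0 ++ [(0:Int)] = _
      rw [ih, ← List.replicate_succ' (n := k)]

theorem toDigitsCore_two : ∀ (f n : Nat) (ds : List Char),
    n < f → Nat.toDigitsCore 2 f n ds = binN n ++ ds := by
  intro f
  induction f with
  | zero => intro n ds h; omega
  | succ f ih =>
      intro n ds h
      rw [Nat.toDigitsCore]
      by_cases h2 : n < 2
      · have : n / 2 = 0 := by omega
        simp only [this]
        rw [binN, if_pos h2]
        have : n % 2 = n := by omega
        rw [this]
        rfl
      · have hne : ¬ (n / 2 = 0) := by omega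
        simp only [if_neg hne]
        rw [ih (n / 2) _ (by omega)]
        conv_rhs => rw [binN, if_neg h2]
        rw [List.append_assoc]
        rfl

theorem toDigits_two (n : Nat) : Nat.toDigits 2 n = binN n := by
  show Nat.toDigitsCore 2 (n + 1) n [] = binN n
  rw [toDigitsCore_two (n + 1) n [] (by omega), List.append_nil]

theorem binN_pad : ∀ (k n : Nat), n < 2 ^ k → 0 < k →
    List.replicate (k - (binN n).length) (0:Int)
      ++ (binN n).map (fun c => if c = '1' then (1:Int) else 0) = bitsN k n := by
  intro k
  induction k with
  | zero => intro n h hk; omega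
  | succ k ih =>
      intro n h _
      by_cases h2 : n < 2
      · rw [binN, if_pos h2]
        show List.replicate (k + 1 - 1) (0:Int) ++ [_] = bitsN k (n / 2) ++ [((n % 2 : Nat) : Int)]
        have hd : n / 2 = 0 := by omega
        have hm : n % 2 = n := by omega
        rw [hd, hm, bitsN_zero, Nat.add_sub_cancel]
        congr 1
        interval_cases n <;> rfl
      · have hk : 0 < k := by
          by_contra hk0
          have : k = 0 := by omega
          rw [this] at h; omega
        rw [binN, if_neg h2]
        have hL : (binN (n/2) ++ [Nat.digitChar (n % 2)]).length = (binN (n/2)).length + 1 := by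
          simp
        rw [hL, Nat.succ_sub_succ, List.map_append, ← List.append_assoc,
            ih (n / 2) (by omega) hk]
        show bitsN k (n / 2) ++ _ = bitsN k (n / 2) ++ [((n % 2 : Nat) : Int)]
        congr 1
        have : n % 2 = 0 ∨ n % 2 = 1 := by omega
        rcases this with h0 | h0 <;> rw [h0] <;> rfl

-- One outer iteration followed by the remaining n: the invariant of A's loop.
theorem iterA : ∀ (n : Nat) (tmp : Int) (suffix : List Int),
    (stepA^[n] (List.replicate (4 * n) (0:Int) ++ suffix, tmp, ((4 * n : Nat) : Int) - 1)).1 =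
      bitsI (4 * n) tmp ++ suffix := by
  intro n
  induction n with
  | zero => intro tmp suffix; simp [bitsI]
  | succ n ih =>
      intro tmp suffix
      rw [Function.iterate_succ_apply]
      have hstep : stepA (List.replicate (4 * (n+1)) (0:Int) ++ suffix, tmp, ((4 * (n+1) : Nat) : Int) - 1) =
          (List.replicate (4 * n) (0:Int) ++
             ([PySem.Int.mod (PySem.Int.floordiv (PySem.Int.floordiv (PySem.Int.floordiv (PySem.Int.band tmp 0xF) 2) 2) 2) 2,
               PySem.Int.mod (PySem.Int.floordiv (PySem.Int.floordiv (PySem.Int.band tmp 0xF) 2) 2) 2,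
               PySem.Int.mod (PySem.Int.floordiv (PySem.Int.band tmp 0xF) 2) 2,
               PySem.Int.mod (PySem.Int.band tmp 0xF) 2] ++ suffix),
           tmp >>> (4 : Nat), ((4 * n : Nat) : Int) - 1) := by
        have hr : PySem.List.pyRange 0 4 1 = [0, 1, 2, 3] := by decide
        simp only [stepA, hr, List.foldl]
        have e0 : ((4 * (n+1) : Nat) : Int) - 1 = ((4 * n + 3 : Nat) : Int) := by push_cast; ring
        have e1 : ((4 * n + 3 : Nat) : Int) - 1 = ((4 * n + 2 : Nat) : Int) := by push_cast; ring
        have e2 : ((4 * n + 2 : Nat) : Int) - 1 = ((4 * n + 1 : Nat) : Int) := by push_cast; ring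
        have e3 : ((4 * n + 1 : Nat) : Int) - 1 = ((4 * n : Nat) : Int) := by push_cast; ring
        have r0 : (4 * (n+1) : Nat) = (4 * n + 3) + 1 := by ring
        have r1 : (4 * n + 3 : Nat) = (4 * n + 2) + 1 := by ring
        have r2 : (4 * n + 2 : Nat) = (4 * n + 1) + 1 := by ring
        rw [e0, r0, writeRep, e1, r1, writeRep, e2, r2, writeRep, e3, writeRep]
        rfl
      rw [hstep, ih]
      have split4 : bitsI (4 * (n+1)) tmp = bitsI (4 * n) (tmp / (2 ^ 4 : Int)) ++ bitsI 4 tmp := by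
        have : 4 * (n + 1) = 4 * n + 4 := by ring
        rw [this, bitsI_add]
      have hsh : tmp >>> (4 : Nat) = tmp / (2 ^ 4 : Int) := by
        rw [Int.shiftRight_eq_div_pow]; norm_num
      rw [split4, List.append_assoc, hsh]
      congr 1
      congr 1
      have hb : PySem.Int.band tmp 0xF = tmp % (2 ^ 4 : Int) := by
        rw [band_fifteen]; norm_num
      rw [← bitsI_emod 4 tmp, ← hb]
      simp only [PySem.Int.mod_eq_emod_of_pos (by norm_num : (0:Int) < 2),
        PySem.Int.floordiv_eq_ediv_of_pos (by norm_num : (0:Int) < 2)]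
      simp [bitsI]

theorem hexatobinary_total_eq (hexa nbrHexa : Int) :
    hexatobinary hexa nbrHexa = hexatobinary_alt hexa nbrHexa := by
  by_cases h : nbrHexa ≤ 0
  · have h0 : nbrHexa.toNat = 0 := by omega
    have h1 : (nbrHexa * 4).toNat = 0 := by
      have : nbrHexa * 4 ≤ 0 := by omega
      omega
    rw [hexatobinary_eq_iter, h0, hexatobinary_alt]
    simp [h1, show nbrHexa * 4 ≤ 0 by omega]
  · rw [not_le] at h
    set n := nbrHexa.toNat with hn
    have hcast : nbrHexa = ((n : Nat) : Int) := by omega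
    have htot : (nbrHexa * 4).toNat = 4 * n := by omega
    have hposn : 0 < n := by omega
    -- left side
    rw [hexatobinary_eq_iter, htot]
    have hc : nbrHexa * 4 - 1 = ((4 * n : Nat) : Int) - 1 := by omega
    have hA : (stepA^[n] (List.replicate (4 * n) (0:Int) ++ [], hexa, ((4 * n : Nat) : Int) - 1)).1 =
        bitsI (4 * n) hexa ++ [] := iterA n hexa []
    rw [List.append_nil] at hA
    rw [hc, hA]
    -- right side
    rw [hexatobinary_alt]
    simp only [htot]
    rw [if_neg (by omega : ¬ nbrHexa * 4 ≤ 0)]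
    have hshift : ((1 : Int) <<< (4 * n)) = (2 ^ (4 * n) : Int) := by
      rw [Int.shiftLeft_eq]; ring
    have hpow : (0 : Int) < 2 ^ (4 * n) := by positivity
    set v := PySem.Int.mod hexa ((1 : Int) <<< (4 * n)) with hv
    have hv' : v = hexa % (2 ^ (4 * n) : Int) := by
      rw [hv, hshift, PySem.Int.mod_eq_emod_of_pos hpow]
    have hv0 : 0 ≤ v := by rw [hv']; exact Int.emod_nonneg _ (by positivity)
    have hvlt : v < (2 ^ (4 * n) : Int) := by rw [hv']; exact Int.emod_lt_of_pos _ hpow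
    have hbin : PySem.Int.toBinChars v = binN v.toNat := by
      rw [show PySem.Int.toBinChars v = Nat.toDigits 2 v.toNat by
            simp [PySem.Int.toBinChars, show ¬ v < 0 by omega],
        toDigits_two]
    have hm : v.toNat < 2 ^ (4 * n) := by
      have : ((v.toNat : Nat) : Int) = v := by omega
      have h2 : (((2:Nat) ^ (4 * n) : Nat) : Int) = (2 ^ (4 * n) : Int) := by push_cast; ring
      omega
    rw [hbin, List.map_append, List.map_replicate, List.append_nil]
    simp only [show (if ('0':Char) = '1' then (1:Int) else 0) = (0:Int) from rfl]
    rw [binN_pad (4 * n) v.toNat hm (by omega), ← bitsI_natCast]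
    have : ((v.toNat : Nat) : Int) = hexa % (2 ^ (4 * n) : Int) := by omega
    rw [this, bitsI_emod]

-- ===== VERDICT (by name: the statement is the Claim_ definition above) =====
theorem hexatobinary_spec : Claim_equal_hexatobinary := by
  intro hexa nbrHexa _
  unfold Spec_hexatobinary
  exact hexatobinary_total_eq hexa nbrHexa
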